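-- pv_equiv track=rewrite | github.com/Hyeontae1112/TWI | Simplicial_Complex.py | Minimal_non_faces
-- ===== SOURCE A (Python) =====
-- from itertools import combinations, product, permutations
--
-- def Cpx_bin(K):
--     K2=[]
--     for k in K:
--         z=0
--         for i in k:
--             z=z+2**(i-1)
--         K2.append(z)
--     return K2
--
-- def Minimal_non_faces(cpx_bin, m, n):
--     MNF = []
--     mnf_vector = [0]*n
--     for d in range(2, n+2):
--         C = combinations(range(1, m+1), d)
--         for c in C:
--             nf = Cpx_bin([c])[0]
--             for mnf in MNF:
--                 if mnf|nf == nf: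
--                     break
--             else:
--                 for f in cpx_bin:
--                     if nf|f == f:
--                         break
--                 else:
--                     MNF.append(nf)
--                     mnf_vector[d-2] += 1
--     return MNF, mnf_vector
-- ===== SOURCE B (Python) =====
-- from itertools import combinations
--
-- def Minimal_non_faces(cpx_bin, m, n):
--     # Local minimality test (all facets of the candidate are faces) instead of
--     # scanning the accumulated MNF list; size-2 candidates are minimal by fiat,
--     # mirroring the convention that singletons are never recorded.
--     def is_face(x):
--         return any(x | f == f for f in cpx_bin)
--     MNF = []
--     mnf_vector = [0] * n
--     for d in range(2, n + 2):
--         for c in combinations(range(1, m + 1), d):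
--             mask = 0
--             for i in c:
--                 mask += 1 << (i - 1)
--             if is_face(mask):
--                 continue
--             if d == 2 or all(is_face(mask - (1 << (i - 1))) for i in c):
--                 MNF.append(mask)
--                 mnf_vector[d - 2] += 1
--     return MNF, mnf_vector
-- ===== Notes on version B (the rewrite author's own statement) =====
-- stated objective: alternative
-- what changed: Minimality of a candidate non-face is decided locally (every facet obtained by deleting one vertex must be a face; size-2 candidates need only be non-faces) instead of scanning the list of previously accumulated minimal non-faces for a submask.
import Mathlib
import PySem

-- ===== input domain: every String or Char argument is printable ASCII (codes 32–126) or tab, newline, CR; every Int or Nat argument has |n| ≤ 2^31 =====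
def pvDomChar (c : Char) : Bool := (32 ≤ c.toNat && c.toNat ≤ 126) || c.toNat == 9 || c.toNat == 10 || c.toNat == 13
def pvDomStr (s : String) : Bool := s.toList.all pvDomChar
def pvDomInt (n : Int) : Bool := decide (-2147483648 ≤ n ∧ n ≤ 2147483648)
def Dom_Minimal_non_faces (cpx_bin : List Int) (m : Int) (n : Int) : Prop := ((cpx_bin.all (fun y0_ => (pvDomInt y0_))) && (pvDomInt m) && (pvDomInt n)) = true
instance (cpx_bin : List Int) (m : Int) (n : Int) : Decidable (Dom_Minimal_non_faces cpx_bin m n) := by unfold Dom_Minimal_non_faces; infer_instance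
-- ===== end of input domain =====

-- B replaces A's scan of the accumulated minimal-non-face list by a local minimality
-- test (every facet of the candidate must be a face; size-2 candidates need only be
-- non-faces); same enumeration order, same outputs (objective: alternative).


-- ===== PORT A =====

-- itertools.combinations(l, d), in itertools' lexicographic order (shared helper:
-- both Pythons call itertools.combinations on the same range).
def pvCombos : List Int → Nat → List (List Int)
  | _, 0 => [[]]
  | [], _ + 1 => []
  | x :: xs, d + 1 => (pvCombos xs d).map (fun c => x :: c) ++ pvCombos xs (d + 1)

-- Cpx_bin from the module; 2**(i-1) is ported as 2 ^ (i-1).toNat, exact for the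
-- i ≥ 1 this file ever passes (elements of range(1, m+1)).
def pvCpxBin (K : List (List Int)) : List Int :=
  K.foldl (fun K2 k => K2 ++ [k.foldl (fun z i => z + 2 ^ (i - 1).toNat) 0]) []

def Minimal_non_faces (cpx_bin : List Int) (m : Int) (n : Int) : List Int × List Int :=
  (PySem.List.pyRange 2 (n + 2) 1).foldl (fun st d =>
    (pvCombos (PySem.List.pyRange 1 (m + 1) 1) d.toNat).foldl (fun st c =>
      let nf := PySem.List.pyGetD (pvCpxBin [c]) 0 0
      if st.1.any (fun mnf => PySem.Int.bor mnf nf == nf) then st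
      else if cpx_bin.any (fun f => PySem.Int.bor nf f == f) then st
      else (st.1 ++ [nf], st.2.modify (d - 2).toNat (· + 1)))   -- index d-2 ∈ [0, n-1]: exact
      st)
    ([], List.replicate n.toNat 0)

-- ===== PORT B =====

def pvIsFace (cpx_bin : List Int) (x : Int) : Bool :=
  cpx_bin.any (fun f => PySem.Int.bor x f == f)

def Minimal_non_faces_alt (cpx_bin : List Int) (m : Int) (n : Int) : List Int × List Int :=
  (PySem.List.pyRange 2 (n + 2) 1).foldl (fun st d =>
    (pvCombos (PySem.List.pyRange 1 (m + 1) 1) d.toNat).foldl (fun st c =>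
      let mask := c.foldl (fun z i => z + (1 : Int) <<< (i - 1).toNat) 0
      if pvIsFace cpx_bin mask then st
      else if d == 2 || c.all (fun i => pvIsFace cpx_bin (mask - (1 : Int) <<< (i - 1).toNat)) then
        (st.1 ++ [mask], st.2.modify (d - 2).toNat (· + 1))
      else st)
      st)
    ([], List.replicate n.toNat 0)

-- ===== PRECONDITION & SPEC =====
def Spec_Minimal_non_faces (cpx_bin : List Int) (m : Int) (n : Int) (out : List Int × List Int) : Prop := out = Minimal_non_faces_alt cpx_bin m n
instance (cpx_bin : List Int) (m : Int) (n : Int) (out : List Int × List Int) : Decidable (Spec_Minimal_non_faces cpx_bin m n out) := by unfold Spec_Minimal_non_faces; infer_instance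

-- ===== CLAIM (what is proved, stated in full; the proofs are below) =====
def Claim_equal_Minimal_non_faces : Prop := ∀ (cpx_bin : List Int) (m : Int) (n : Int), Dom_Minimal_non_faces cpx_bin m n → Spec_Minimal_non_faces cpx_bin m n (Minimal_non_faces cpx_bin m n)

-- ===== LEMMAS AND PROOFS =====

def pvPow (i : Int) : Nat := 2 ^ (i - 1).toNat
def pvNmask (c : List Int) : Nat := (c.map pvPow).sum
def pvKeep (cpx : List Int) (c : List Int) : Bool :=
  !(pvIsFace cpx (pvNmask c)) &&
    (c.length == 2 || c.all (fun i => pvIsFace cpx (pvNmask (c.erase i))))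

theorem pvCombos_length {l : List Int} {d : Nat} {c : List Int} (h : c ∈ pvCombos l d) :
    c.length = d := by
  induction l generalizing d c with
  | nil => cases d with
    | zero => simp [pvCombos] at h; simp [h]
    | succ d => simp [pvCombos] at h
  | cons x xs ih =>
    cases d with
    | zero => simp [pvCombos] at h; simp [h]
    | succ d =>
      simp only [pvCombos, List.mem_append, List.mem_map] at h
      rcases h with ⟨c', hc', rfl⟩ | h
      · simp [ih hc']
      · exact ih h

theorem pvCombos_sublist {l : List Int} {d : Nat} {c : List Int} (h : c ∈ pvCombos l d) :
    c.Sublist l := by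
  induction l generalizing d c with
  | nil => cases d with
    | zero => simp [pvCombos] at h; simp [h]
    | succ d => simp [pvCombos] at h
  | cons x xs ih =>
    cases d with
    | zero => simp [pvCombos] at h; simp [h]
    | succ d =>
      simp only [pvCombos, List.mem_append, List.mem_map] at h
      rcases h with ⟨c', hc', rfl⟩ | h
      · exact List.Sublist.cons₂ x (ih hc')
      · exact List.Sublist.cons x (ih h)

theorem pvCombos_complete {l : List Int} {d : Nat} {c : List Int}
    (hs : c.Sublist l) (hd : c.length = d) : c ∈ pvCombos l d := by
  induction l generalizing d c with
  | nil =>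
    rcases List.sublist_nil.mp hs with rfl
    cases d with
    | zero => simp [pvCombos]
    | succ d => simp at hd
  | cons x xs ih =>
    cases d with
    | zero =>
      rcases List.length_eq_zero_iff.mp hd with rfl
      simp [pvCombos]
    | succ d =>
      cases hs with
      | cons _ h => exact List.mem_append_right _ (ih h hd)
      | cons₂ _ h =>
        exact List.mem_append_left _ (List.mem_map.mpr ⟨_, ih h (by simpa using hd), rfl⟩)

theorem pvCombos_nodup {l : List Int} (hl : l.Nodup) (d : Nat) : (pvCombos l d).Nodup := by
  induction l generalizing d with
  | nil => cases d with
    | zero => simp [pvCombos]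
    | succ d => simp [pvCombos]
  | cons x xs ih =>
    have hx : x ∉ xs := by simp_all
    have hxs : xs.Nodup := by simp_all
    cases d with
    | zero => simp [pvCombos]
    | succ d =>
      refine List.Nodup.append ((ih hxs d).map ?_ ) (ih hxs (d+1)) ?_
      · intro a b hab; simpa using hab
      · intro c hc1 hc2
        rcases List.mem_map.mp hc1 with ⟨c', _, rfl⟩
        exact hx (List.Sublist.mem (by simp) (pvCombos_sublist hc2))

theorem pvFoldA_eq (c : List Int) (z : Int) :
    c.foldl (fun z i => z + 2 ^ (i - 1).toNat) z = z + (pvNmask c : Int) := by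
  induction c generalizing z with
  | nil => simp [pvNmask]
  | cons x xs ih =>
    simp only [List.foldl_cons, ih, pvNmask, List.map_cons, List.sum_cons, pvPow]
    push_cast; ring

theorem pvFoldB_eq (c : List Int) (z : Int) :
    c.foldl (fun z i => z + (1 : Int) <<< (i - 1).toNat) z = z + (pvNmask c : Int) := by
  induction c generalizing z with
  | nil => simp [pvNmask]
  | cons x xs ih =>
    simp only [List.foldl_cons, ih, pvNmask, List.map_cons, List.sum_cons, pvPow]
    rw [show ((1:Int) = ((1:Nat):Int)) from rfl, Int.shiftLeft_natCast, Nat.shiftLeft_eq]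
    push_cast; ring

theorem pvNmask_dvd {c : List Int} {t : Nat} (h : ∀ i ∈ c, (t : Int) ≤ i - 1) :
    2 ^ t ∣ pvNmask c := by
  induction c with
  | nil => simp [pvNmask]
  | cons x xs ih =>
    simp only [pvNmask, List.map_cons, List.sum_cons]
    refine Nat.dvd_add ?_ (ih fun i hi => h i (List.mem_cons_of_mem _ hi))
    have hx : (t : Int) ≤ x - 1 := h x (List.mem_cons_self)
    exact pow_dvd_pow 2 (by omega)

theorem pvTestBit_nmask {c : List Int} (hs : c.Pairwise (· < ·)) (hp : ∀ i ∈ c, 1 ≤ i)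
    (k : Nat) : (pvNmask c).testBit k = decide ((k : Int) + 1 ∈ c) := by
  induction c with
  | nil => simp [pvNmask]
  | cons x xs ih =>
    have hx1 : 1 ≤ x := hp x List.mem_cons_self
    have hgt : ∀ i ∈ xs, x < i := fun i hi => (List.pairwise_cons.mp hs).1 i hi
    set j : Nat := (x - 1).toNat with hj
    have hxj : (j : Int) = x - 1 := by omega
    have hdvd : 2 ^ (j + 1) ∣ pvNmask xs := by
      refine pvNmask_dvd fun i hi => ?_
      have := hgt i hi; push_cast; omega
    rcases hdvd with ⟨q, hq⟩
    have hmask : pvNmask (x :: xs) = 2 ^ (j + 1) * q + 2 ^ j := by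
      simp only [pvNmask, List.map_cons, List.sum_cons, pvPow, ← hj]
      rw [show (List.map pvPow xs).sum = pvNmask xs from rfl, hq]; ring
    have hlt : 2 ^ j < 2 ^ (j + 1) := by
      exact Nat.pow_lt_pow_right (by norm_num) (by omega)
    rw [hmask, Nat.testBit_two_pow_mul_add q hlt k]
    by_cases hk : k < j + 1
    · rw [if_pos hk]
      by_cases hkj : k = j
      · have hmem : ((k : Int) + 1 ∈ x :: xs) := by
          simp only [List.mem_cons]; left; omega
        rw [Nat.testBit_two_pow]
        simp only [hkj, decide_true, List.mem_cons, true_eq_decide_iff]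
        left; omega
      · have hne : ((k : Int) + 1 ∉ x :: xs) := by
          simp only [List.mem_cons]
          rintro (h1 | h2)
          · omega
          · have := hgt _ h2; omega
        rw [Nat.testBit_two_pow]
        simp [hne, show ¬ j = k from fun h => hkj h.symm]
    · rw [if_neg hk]
      have hxs : xs.Pairwise (· < ·) := (List.pairwise_cons.mp hs).2
      have hpxs : ∀ i ∈ xs, 1 ≤ i := fun i hi => hp i (List.mem_cons_of_mem _ hi)
      have hq' : (q.testBit (k - (j+1))) = (pvNmask xs).testBit k := by
        rw [hq, Nat.testBit_two_pow_mul]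
        simp [show j + 1 ≤ k by omega]
      rw [hq', ih hxs hpxs]
      have : ((k : Int) + 1 ≠ x) := by omega
      simp [this]

theorem pvLor_eq_right_iff (s t : Nat) :
    s ||| t = t ↔ (∀ k, s.testBit k = true → t.testBit k = true) := by
  constructor
  · intro h k hk
    have := congrArg (fun z => z.testBit k) h
    simpa [Nat.testBit_lor, hk] using this
  · intro h
    apply Nat.eq_of_testBit_eq
    intro k
    rw [Nat.testBit_lor]
    cases hs : s.testBit k
    · simp
    · simp [h k hs]

theorem pvNmask_subset_iff {c c' : List Int}
    (hs : c.Pairwise (· < ·)) (hp : ∀ i ∈ c, 1 ≤ i)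
    (hs' : c'.Pairwise (· < ·)) (hp' : ∀ i ∈ c', 1 ≤ i) :
    pvNmask c ||| pvNmask c' = pvNmask c' ↔ (∀ i ∈ c, i ∈ c') := by
  rw [pvLor_eq_right_iff]
  constructor
  · intro h i hi
    have this : ((i - 1).toNat : Int) + 1 = i := by have := hp i hi; omega
    have h1 : (pvNmask c).testBit (i - 1).toNat = true := by
      rw [pvTestBit_nmask hs hp, this]
      exact decide_eq_true hi
    have h2 := h _ h1
    rw [pvTestBit_nmask hs' hp'] at h2
    rw [this] at h2
    exact of_decide_eq_true h2
  · intro h k hk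
    rw [pvTestBit_nmask hs hp] at hk
    rw [pvTestBit_nmask hs' hp']
    simp only [decide_eq_true_eq] at hk ⊢
    exact h _ hk

theorem pvLand_zero_of_sub {g s t : Nat} (hsub : s ||| t = t) (hgt : g &&& t = 0) :
    g &&& s = 0 := by
  apply Nat.eq_of_testBit_eq
  intro k
  have h1 := congrArg (fun z => z.testBit k) hgt
  simp only [Nat.testBit_land, Nat.zero_testBit] at h1 ⊢
  cases hgk : g.testBit k
  · simp
  · cases hsk : s.testBit k
    · simp
    · have := (pvLor_eq_right_iff s t).mp hsub k hsk
      simp [hgk, this] at h1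
theorem pvBor_mono {s t : Nat} (hsub : s ||| t = t) (f : Int)
    (hf : PySem.Int.bor (t : Int) f = f) : PySem.Int.bor (s : Int) f = f := by
  unfold PySem.Int.bor at hf ⊢
  by_cases h0 : 0 ≤ f
  · rw [if_pos (by positivity), if_pos h0] at hf ⊢
    have hft : f = ((f.toNat : Nat) : Int) := by omega
    have : (t:Int).toNat ||| f.toNat = f.toNat := by
      rw [hft] at hf
      exact_mod_cast hf
    simp only [Int.toNat_natCast] at this
    have hs : s ||| f.toNat = f.toNat := by
      rw [pvLor_eq_right_iff] at this ⊢
      intro k hk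
      exact this k ((pvLor_eq_right_iff s t).mp hsub k hk)
    rw [hft]
    exact_mod_cast congrArg (fun z => ((z : Nat) : Int)) hs
  · rw [if_pos (by positivity), if_neg h0] at hf ⊢
    set g : Nat := (-f - 1).toNat with hg
    have hgf : (g : Int) = -f - 1 := by omega
    have ht0 : g - (g &&& (t:Int).toNat) = g := by omega
    have hle : g &&& t ≤ g := Nat.and_le_left
    simp only [Int.toNat_natCast] at ht0
    have hgt : g &&& t = 0 := by omega
    have hgs : g &&& s = 0 := pvLand_zero_of_sub hsub hgt
    simp only [Int.toNat_natCast, hgs]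
    omega

theorem pvFace_mono {cpx : List Int} {s t : Nat} (hsub : s ||| t = t)
    (ht : pvIsFace cpx (t : Int) = true) : pvIsFace cpx (s : Int) = true := by
  unfold pvIsFace at ht ⊢
  rw [List.any_eq_true] at ht ⊢
  rcases ht with ⟨f, hf, hbor⟩
  exact ⟨f, hf, by rw [beq_iff_eq] at hbor ⊢; exact pvBor_mono hsub f hbor⟩

theorem pvNmask_erase {c : List Int} {i : Int} (hi : i ∈ c) :
    pvNmask c = pvPow i + pvNmask (c.erase i) := by
  have hperm : c.Perm (i :: c.erase i) := List.perm_cons_erase hi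
  have := (hperm.map pvPow).sum_eq
  simpa [pvNmask] using this

theorem pvSorted_eq_of_subset_len {c c' : List Int}
    (hs : c.Pairwise (· < ·)) (hs' : c'.Pairwise (· < ·))
    (hsub : ∀ i ∈ c, i ∈ c') (hlen : c.length = c'.length) : c = c' := by
  have hnd : c.Nodup := hs.nodup
  have hnd' : c'.Nodup := hs'.nodup
  have hsp : c.Subperm c' := List.subperm_of_subset hnd (fun x hx => hsub x hx)
  have hperm : c.Perm c' := hsp.perm_of_length_le (by omega)
  exact hperm.eq_of_pairwise (fun a b ha hb hab hba => absurd hba (lt_asymm hab)) hs hs'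

theorem pvNonface_kept (cpx : List Int) (N : Nat) : ∀ (s : List Int), s.length ≤ N →
    s.Pairwise (· < ·) → (∀ i ∈ s, 1 ≤ i) → 2 ≤ s.length →
    pvIsFace cpx (pvNmask s) = false →
    ∃ u, u.Sublist s ∧ 2 ≤ u.length ∧ pvKeep cpx u = true := by
  induction N with
  | zero => intro s hN _ _ h2 _; omega
  | succ N ih =>
    intro s hN hs hp h2 hface
    by_cases hloc : s.length = 2 ∨ s.all (fun i => pvIsFace cpx (pvNmask (s.erase i))) = true
    · refine ⟨s, List.Sublist.refl s, h2, ?_⟩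
      unfold pvKeep
      rcases hloc with h | h
      · simp [hface, h]
      · simp [hface, h]
    · push_neg at hloc
      obtain ⟨hlen2, hall⟩ := hloc
      rw [Ne, List.all_eq_true] at hall
      push_neg at hall
      obtain ⟨i, hi, hif⟩ := hall
      have hif' : pvIsFace cpx (pvNmask (s.erase i)) = false := by
        simpa using hif
      have hsub : (s.erase i).Sublist s := List.erase_sublist
      have hlen : (s.erase i).length = s.length - 1 := List.length_erase_of_mem hi
      obtain ⟨u, hu1, hu2, hu3⟩ := ih (s.erase i) (by omega) (hs.sublist hsub)
        (fun j hj => hp j (List.mem_of_mem_erase hj)) (by omega) hif'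
      exact ⟨u, hu1.trans hsub, hu2, hu3⟩

theorem pvSubset_of_lor {c c' R : List Int} (hR : R.Pairwise (· < ·))
    (hRpos : ∀ i ∈ R, 1 ≤ i) (hc : c.Sublist R) (hc' : c'.Sublist R)
    (h : pvNmask c ||| pvNmask c' = pvNmask c') : ∀ i ∈ c, i ∈ c' :=
  (pvNmask_subset_iff (hR.sublist hc) (fun i hi => hRpos i (hc.mem hi))
    (hR.sublist hc') (fun i hi => hRpos i (hc'.mem hi))).mp h

theorem pvLor_of_subset {c c' R : List Int} (hR : R.Pairwise (· < ·))
    (hRpos : ∀ i ∈ R, 1 ≤ i) (hc : c.Sublist R) (hc' : c'.Sublist R)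
    (h : ∀ i ∈ c, i ∈ c') : pvNmask c ||| pvNmask c' = pvNmask c' :=
  (pvNmask_subset_iff (hR.sublist hc) (fun i hi => hRpos i (hc.mem hi))
    (hR.sublist hc') (fun i hi => hRpos i (hc'.mem hi))).mpr h

theorem pvMain (cpx R : List Int) (hR : R.Pairwise (· < ·)) (hRpos : ∀ i ∈ R, 1 ≤ i)
    (P : List (List Int)) (d : Nat) (hd : 2 ≤ d)
    (c : List Int) (hc : c.Sublist R) (hclen : c.length = d)
    (hface : pvIsFace cpx (pvNmask c) = false)
    (hPmem : ∀ c' ∈ P, c'.Sublist R ∧ 2 ≤ c'.length ∧ (c'.length < d ∨ c' ≠ c))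
    (hPcomp : ∀ u, u.Sublist R → 2 ≤ u.length → u.length < d → u ∈ P) :
    (((P.filter (pvKeep cpx)).map (fun c' => ((pvNmask c' : Nat) : Int))).any
        (fun mnf => PySem.Int.bor mnf ((pvNmask c : Nat) : Int) == ((pvNmask c : Nat) : Int))) =
      !(decide (d = 2) || c.all (fun i => pvIsFace cpx (pvNmask (c.erase i)))) := by
  have hcP : c.Pairwise (· < ·) := hR.sublist hc
  have hcpos : ∀ i ∈ c, 1 ≤ i := fun i hi => hRpos i (hc.mem hi)
  by_cases hhit : (((P.filter (pvKeep cpx)).map (fun c' => ((pvNmask c' : Nat) : Int))).any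
      (fun mnf => PySem.Int.bor mnf ((pvNmask c : Nat) : Int) == ((pvNmask c : Nat) : Int))) = true
  · rw [hhit]
    -- a previously kept submask exists: show the local test fails
    rw [List.any_eq_true] at hhit
    obtain ⟨mnf, hmem, hbor⟩ := hhit
    rw [List.mem_map] at hmem
    obtain ⟨c', hc'f, rfl⟩ := hmem
    rw [List.mem_filter] at hc'f
    obtain ⟨hc'P, hkeep⟩ := hc'f
    obtain ⟨hc'R, hc'2, hc'd⟩ := hPmem c' hc'P
    rw [beq_iff_eq, PySem.Int.bor_natCast] at hbor
    have hlor : pvNmask c' ||| pvNmask c = pvNmask c := by exact_mod_cast hbor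
    have hsub : ∀ i ∈ c', i ∈ c := pvSubset_of_lor hR hRpos hc'R hc hlor
    have hnd' : c'.Nodup := (hR.sublist hc'R).nodup
    have hlen_le : c'.length ≤ c.length :=
      (List.subperm_of_subset hnd' (fun x hx => hsub x hx)).length_le
    have hlt : c'.length < d := by
      rcases hc'd with h | hne
      · exact h
      · rcases Nat.lt_or_ge c'.length d with h | h
        · exact h
        · exfalso
          exact hne (pvSorted_eq_of_subset_len (hR.sublist hc'R) hcP hsub (by omega))
    -- find i ∈ c not in c'
    have hex : ∃ i ∈ c, i ∉ c' := by
      by_contra hno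
      push_neg at hno
      have : c.length ≤ c'.length :=
        (List.subperm_of_subset hcP.nodup (fun x hx => hno x hx)).length_le
      omega
    obtain ⟨i, hi, hni⟩ := hex
    have hsub2 : ∀ x ∈ c', x ∈ c.erase i := by
      intro x hx
      exact (List.Nodup.mem_erase_iff hcP.nodup).mpr ⟨fun h => hni (h ▸ hx), hsub x hx⟩
    have herased : (c.erase i).Sublist c := List.erase_sublist
    have herasedR : (c.erase i).Sublist R := herased.trans hc
    have hlor2 : pvNmask c' ||| pvNmask (c.erase i) = pvNmask (c.erase i) :=
      pvLor_of_subset hR hRpos hc'R herasedR hsub2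
    have hfc' : pvIsFace cpx (pvNmask c') = false := by
      unfold pvKeep at hkeep
      rw [Bool.and_eq_true] at hkeep
      simpa using hkeep.1
    have hfe : pvIsFace cpx (pvNmask (c.erase i)) = false := by
      cases hfe : pvIsFace cpx (pvNmask (c.erase i))
      · rfl
      · exact absurd (pvFace_mono hlor2 hfe) (by simp [hfc'])
    have hd3 : d ≠ 2 := by omega
    symm
    simp only [Bool.not_eq_eq_eq_not, Bool.not_true, Bool.or_eq_false_iff]
    exact ⟨by simp [hd3], by
      rw [List.all_eq_false]
      exact ⟨i, hi, by simp [hfe]⟩⟩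
  · rw [Bool.not_eq_true] at hhit
    rw [hhit]
    symm
    rw [Bool.not_eq_false', Bool.or_eq_true]
    by_contra hcon
    push_neg at hcon
    obtain ⟨hd2, hall⟩ := hcon
    have hd2' : d ≠ 2 := by simpa using hd2
    rw [Ne, List.all_eq_true] at hall
    push_neg at hall
    obtain ⟨i, hi, hif⟩ := hall
    have hif' : pvIsFace cpx (pvNmask (c.erase i)) = false := by simpa using hif
    have herased : (c.erase i).Sublist c := List.erase_sublist
    have herasedR : (c.erase i).Sublist R := herased.trans hc
    have hlen : (c.erase i).length = c.length - 1 := List.length_erase_of_mem hi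
    obtain ⟨u, hu1, hu2, hu3⟩ := pvNonface_kept cpx (c.erase i).length (c.erase i)
      le_rfl (hR.sublist herasedR) (fun j hj => hRpos j (herasedR.mem hj)) (by omega) hif'
    have huR : u.Sublist R := (hu1.trans herased).trans hc
    have hulen : u.length < d := by
      have := hu1.length_le
      omega
    have huP : u ∈ P := hPcomp u huR hu2 hulen
    have hulor : pvNmask u ||| pvNmask c = pvNmask c :=
      pvLor_of_subset hR hRpos huR hc (fun x hx => (hu1.trans herased).mem hx)
    have : (((P.filter (pvKeep cpx)).map (fun c' => ((pvNmask c' : Nat) : Int))).any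
        (fun mnf => PySem.Int.bor mnf ((pvNmask c : Nat) : Int) == ((pvNmask c : Nat) : Int))) = true := by
      rw [List.any_eq_true]
      refine ⟨((pvNmask u : Nat) : Int), List.mem_map.mpr ⟨u, List.mem_filter.mpr ⟨huP, hu3⟩, rfl⟩, ?_⟩
      rw [beq_iff_eq, PySem.Int.bor_natCast]
      exact_mod_cast hulor
    rw [hhit] at this
    exact absurd this (by simp)

theorem pvAll_congr {l : List Int} {f g : Int → Bool} (h : ∀ a ∈ l, f a = g a) :
    l.all f = l.all g := by
  induction l with
  | nil => rfl
  | cons x xs ih =>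
    simp only [List.all_cons, h x List.mem_cons_self,
      ih fun a ha => h a (List.mem_cons_of_mem _ ha)]

theorem pvNfA (c : List Int) :
    PySem.List.pyGetD (pvCpxBin [c]) 0 0 = ((pvNmask c : Nat) : Int) := by
  have h0 : pvCpxBin [c] = [c.foldl (fun z i => z + 2 ^ (i - 1).toNat) 0] := rfl
  have h1 : pvCpxBin [c] = [((pvNmask c : Nat) : Int)] := by
    rw [h0, pvFoldA_eq, zero_add]
  rw [h1]
  simp [PySem.List.pyGetD]

theorem pvSubBit {c : List Int} {i : Int} (hi : i ∈ c) :
    ((pvNmask c : Nat) : Int) - (1 : Int) <<< ((i - 1).toNat : Nat)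
      = ((pvNmask (c.erase i) : Nat) : Int) := by
  rw [Int.shiftLeft_eq, pvNmask_erase hi]
  push_cast [pvPow]
  ring

theorem pvStep (cpx : List Int) (m d : Int) (hd : 2 ≤ d)
    (P : List (List Int)) (c : List Int)
    (hc : c ∈ pvCombos (PySem.List.pyRange 1 (m + 1) 1) d.toNat)
    (hPmem : ∀ c' ∈ P, c'.Sublist (PySem.List.pyRange 1 (m + 1) 1) ∧ 2 ≤ c'.length ∧
      (c'.length < d.toNat ∨ c' ≠ c))
    (hPcomp : ∀ u, u.Sublist (PySem.List.pyRange 1 (m + 1) 1) → 2 ≤ u.length →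
      u.length < d.toNat → u ∈ P)
    (vec : List Int) :
    ((fun (st : List Int × List Int) (c : List Int) =>
      let nf := PySem.List.pyGetD (pvCpxBin [c]) 0 0
      if st.1.any (fun mnf => PySem.Int.bor mnf nf == nf) then st
      else if cpx.any (fun f => PySem.Int.bor nf f == f) then st
      else (st.1 ++ [nf], st.2.modify (d - 2).toNat (· + 1)))
        (((P.filter (pvKeep cpx)).map fun c' => ((pvNmask c' : Nat) : Int)), vec) c
     = (fun (st : List Int × List Int) (c : List Int) =>
      let mask := c.foldl (fun z i => z + (1 : Int) <<< (i - 1).toNat) 0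
      if pvIsFace cpx mask then st
      else if d == 2 || c.all (fun i => pvIsFace cpx (mask - (1 : Int) <<< (i - 1).toNat)) then
        (st.1 ++ [mask], st.2.modify (d - 2).toNat (· + 1))
      else st)
        (((P.filter (pvKeep cpx)).map fun c' => ((pvNmask c' : Nat) : Int)), vec) c)
    ∧ ((fun (st : List Int × List Int) (c : List Int) =>
      let nf := PySem.List.pyGetD (pvCpxBin [c]) 0 0
      if st.1.any (fun mnf => PySem.Int.bor mnf nf == nf) then st
      else if cpx.any (fun f => PySem.Int.bor nf f == f) then st
      else (st.1 ++ [nf], st.2.modify (d - 2).toNat (· + 1)))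
        (((P.filter (pvKeep cpx)).map fun c' => ((pvNmask c' : Nat) : Int)), vec) c).1
      = (((P ++ [c]).filter (pvKeep cpx)).map fun c' => ((pvNmask c' : Nat) : Int)) := by
  have hR : (PySem.List.pyRange 1 (m + 1) 1).Pairwise (· < ·) :=
    PySem.List.pairwise_lt_pyRange_one 1 (m + 1)
  have hRpos : ∀ i ∈ PySem.List.pyRange 1 (m + 1) 1, 1 ≤ i := by
    intro i hi
    exact (PySem.List.mem_pyRange_one.mp hi).1
  have hdt : 2 ≤ d.toNat := by omega
  have hclen : c.length = d.toNat := pvCombos_length hc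
  have hcsub : c.Sublist (PySem.List.pyRange 1 (m + 1) 1) := pvCombos_sublist hc
  simp only [pvNfA, pvFoldB_eq, zero_add]
  have hfaceE : (cpx.any fun f => PySem.Int.bor ((pvNmask c : Nat) : Int) f == f)
      = pvIsFace cpx ((pvNmask c : Nat) : Int) := rfl
  have hallE : (c.all fun i => pvIsFace cpx (((pvNmask c : Nat) : Int) - (1 : Int) <<< (i - 1).toNat))
      = c.all fun i => pvIsFace cpx ((pvNmask (c.erase i) : Nat) : Int) := by
    refine pvAll_congr fun i hi => ?_
    rw [pvSubBit hi]
  have hd2E : ((d == 2) : Bool) = decide (d.toNat = 2) := by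
    have : (d == 2) = decide (d = 2) := rfl
    rw [this]
    rcases Decidable.em (d = 2) with h | h
    · simp [h]
    · simp [h]; omega
  cases hfc : pvIsFace cpx ((pvNmask c : Nat) : Int) with
  | true =>
    rw [hfaceE, hfc]
    have hkc : pvKeep cpx c = false := by
      unfold pvKeep
      simp [hfc]
    constructor
    · cases hhit : ((P.filter (pvKeep cpx)).map fun c' => ((pvNmask c' : Nat) : Int)).any
        (fun mnf => PySem.Int.bor mnf ((pvNmask c : Nat) : Int) == ((pvNmask c : Nat) : Int)) <;>
        simp [hhit]
    · cases hhit : ((P.filter (pvKeep cpx)).map fun c' => ((pvNmask c' : Nat) : Int)).any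
        (fun mnf => PySem.Int.bor mnf ((pvNmask c : Nat) : Int) == ((pvNmask c : Nat) : Int)) <;>
        simp [hhit, List.filter_append, hkc]
  | false =>
    have hmain := pvMain cpx (PySem.List.pyRange 1 (m + 1) 1) hR hRpos P d.toNat hdt c hcsub
      hclen hfc (fun c' hc' => (hPmem c' hc')) hPcomp
    rw [hfaceE, hfc, hmain, hallE, hd2E]
    cases hloc : (decide (d.toNat = 2) || c.all fun i => pvIsFace cpx ((pvNmask (c.erase i) : Nat) : Int)) with
    | true =>
      have hkc : pvKeep cpx c = true := by
        unfold pvKeep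
        rw [Bool.or_eq_true] at hloc
        rcases hloc with h | h
        · simp [hfc, hclen]; left; exact of_decide_eq_true h
        · simp [hfc, h]
      simp only [Bool.not_true, Bool.false_eq_true, if_false, if_true, List.filter_append,
        List.filter_cons, hkc, List.filter_nil, List.map_append, if_true]
      constructor <;> simp
    | false =>
      have hkc : pvKeep cpx c = false := by
        unfold pvKeep
        rw [Bool.or_eq_false_iff] at hloc
        simp only [hfc, Bool.not_false, Bool.true_and]
        rw [Bool.or_eq_false_iff]
        exact ⟨by rw [← hclen] at hloc; simpa using hloc.1, hloc.2⟩
      simp only [Bool.not_false, if_true, List.filter_append, List.filter_cons, hkc,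
        List.filter_nil, List.map_append]
      constructor <;> simp

theorem pvInner (cpx : List Int) (m d : Int) (hd : 2 ≤ d)
    (Pprev : List (List Int))
    (hPrevMem : ∀ c' ∈ Pprev, c'.Sublist (PySem.List.pyRange 1 (m + 1) 1) ∧ 2 ≤ c'.length ∧
      c'.length < d.toNat)
    (hPrevComp : ∀ u, u.Sublist (PySem.List.pyRange 1 (m + 1) 1) → 2 ≤ u.length →
      u.length < d.toNat → u ∈ Pprev) :
    ∀ (Q Pre : List (List Int)), pvCombos (PySem.List.pyRange 1 (m + 1) 1) d.toNat = Pre ++ Q →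
    ∀ (vec : List Int),
    (Q.foldl (fun (st : List Int × List Int) (c : List Int) =>
        let nf := PySem.List.pyGetD (pvCpxBin [c]) 0 0
        if st.1.any (fun mnf => PySem.Int.bor mnf nf == nf) then st
        else if cpx.any (fun f => PySem.Int.bor nf f == f) then st
        else (st.1 ++ [nf], st.2.modify (d - 2).toNat (· + 1)))
        ((((Pprev ++ Pre).filter (pvKeep cpx)).map fun c' => ((pvNmask c' : Nat) : Int)), vec)
      = Q.foldl (fun (st : List Int × List Int) (c : List Int) =>
        let mask := c.foldl (fun z i => z + (1 : Int) <<< (i - 1).toNat) 0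
        if pvIsFace cpx mask then st
        else if d == 2 || c.all (fun i => pvIsFace cpx (mask - (1 : Int) <<< (i - 1).toNat)) then
          (st.1 ++ [mask], st.2.modify (d - 2).toNat (· + 1))
        else st)
        ((((Pprev ++ Pre).filter (pvKeep cpx)).map fun c' => ((pvNmask c' : Nat) : Int)), vec))
    ∧ (Q.foldl (fun (st : List Int × List Int) (c : List Int) =>
        let nf := PySem.List.pyGetD (pvCpxBin [c]) 0 0
        if st.1.any (fun mnf => PySem.Int.bor mnf nf == nf) then st
        else if cpx.any (fun f => PySem.Int.bor nf f == f) then st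
        else (st.1 ++ [nf], st.2.modify (d - 2).toNat (· + 1)))
        ((((Pprev ++ Pre).filter (pvKeep cpx)).map fun c' => ((pvNmask c' : Nat) : Int)), vec)).1
      = (((Pprev ++ (Pre ++ Q)).filter (pvKeep cpx)).map fun c' => ((pvNmask c' : Nat) : Int)) := by
  intro Q
  induction Q with
  | nil =>
    intro Pre hsplit vec
    simp
  | cons c Q' ih =>
    intro Pre hsplit vec
    have hcmem : c ∈ pvCombos (PySem.List.pyRange 1 (m + 1) 1) d.toNat := by
      rw [hsplit]
      exact List.mem_append_right _ List.mem_cons_self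
    have hPmem : ∀ c' ∈ Pprev ++ Pre, c'.Sublist (PySem.List.pyRange 1 (m + 1) 1) ∧
        2 ≤ c'.length ∧ (c'.length < d.toNat ∨ c' ≠ c) := by
      intro c' hc'
      rcases List.mem_append.mp hc' with h | h
      · obtain ⟨h1, h2, h3⟩ := hPrevMem c' h
        exact ⟨h1, h2, Or.inl h3⟩
      · have hc'C : c' ∈ pvCombos (PySem.List.pyRange 1 (m + 1) 1) d.toNat := by
          rw [hsplit]; exact List.mem_append_left _ h
        refine ⟨pvCombos_sublist hc'C, by rw [pvCombos_length hc'C]; omega, Or.inr ?_⟩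
        intro hEq
        have hnd := pvCombos_nodup (PySem.List.pairwise_lt_pyRange_one 1 (m + 1)).nodup d.toNat
        rw [hsplit] at hnd
        have hdisj := List.disjoint_of_nodup_append hnd
        subst hEq
        exact hdisj h List.mem_cons_self
    have hPcomp : ∀ u, u.Sublist (PySem.List.pyRange 1 (m + 1) 1) → 2 ≤ u.length →
        u.length < d.toNat → u ∈ Pprev ++ Pre :=
      fun u h1 h2 h3 => List.mem_append_left _ (hPrevComp u h1 h2 h3)
    obtain ⟨hstepEq, hstep1⟩ := pvStep cpx m d hd (Pprev ++ Pre) c hcmem hPmem hPcomp vec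
    have hassoc : Pprev ++ Pre ++ [c] = Pprev ++ (Pre ++ [c]) := by simp
    rw [hassoc] at hstep1
    have hsplit' : pvCombos (PySem.List.pyRange 1 (m + 1) 1) d.toNat = (Pre ++ [c]) ++ Q' := by
      rw [hsplit]; simp
    have hstAdef : (((fun (st : List Int × List Int) (c : List Int) =>
        let nf := PySem.List.pyGetD (pvCpxBin [c]) 0 0
        if st.1.any (fun mnf => PySem.Int.bor mnf nf == nf) then st
        else if cpx.any (fun f => PySem.Int.bor nf f == f) then st
        else (st.1 ++ [nf], st.2.modify (d - 2).toNat (· + 1)))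
        ((((Pprev ++ Pre).filter (pvKeep cpx)).map fun c' => ((pvNmask c' : Nat) : Int)), vec) c) : List Int × List Int) = ((fun (st : List Int × List Int) (c : List Int) =>
        let nf := PySem.List.pyGetD (pvCpxBin [c]) 0 0
        if st.1.any (fun mnf => PySem.Int.bor mnf nf == nf) then st
        else if cpx.any (fun f => PySem.Int.bor nf f == f) then st
        else (st.1 ++ [nf], st.2.modify (d - 2).toNat (· + 1)))
        ((((Pprev ++ Pre).filter (pvKeep cpx)).map fun c' => ((pvNmask c' : Nat) : Int)), vec) c) := rfl
    -- name the stepped state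
    generalize hgen : (((fun (st : List Int × List Int) (c : List Int) =>
        let nf := PySem.List.pyGetD (pvCpxBin [c]) 0 0
        if st.1.any (fun mnf => PySem.Int.bor mnf nf == nf) then st
        else if cpx.any (fun f => PySem.Int.bor nf f == f) then st
        else (st.1 ++ [nf], st.2.modify (d - 2).toNat (· + 1)))
        ((((Pprev ++ Pre).filter (pvKeep cpx)).map fun c' => ((pvNmask c' : Nat) : Int)), vec) c) : List Int × List Int) = stA at hstep1 hstepEq
    have hpair : stA = ((((Pprev ++ (Pre ++ [c])).filter (pvKeep cpx)).map
        fun c' => ((pvNmask c' : Nat) : Int)), stA.2) := Prod.ext hstep1 rfl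
    obtain ⟨ih1, ih2⟩ := ih (Pre ++ [c]) hsplit' stA.2
    suffices h : (Q'.foldl (fun (st : List Int × List Int) (c : List Int) =>
        let nf := PySem.List.pyGetD (pvCpxBin [c]) 0 0
        if st.1.any (fun mnf => PySem.Int.bor mnf nf == nf) then st
        else if cpx.any (fun f => PySem.Int.bor nf f == f) then st
        else (st.1 ++ [nf], st.2.modify (d - 2).toNat (· + 1))) stA
      = Q'.foldl (fun (st : List Int × List Int) (c : List Int) =>
        let mask := c.foldl (fun z i => z + (1 : Int) <<< (i - 1).toNat) 0
        if pvIsFace cpx mask then st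
        else if d == 2 || c.all (fun i => pvIsFace cpx (mask - (1 : Int) <<< (i - 1).toNat)) then
          (st.1 ++ [mask], st.2.modify (d - 2).toNat (· + 1))
        else st) ((fun (st : List Int × List Int) (c : List Int) =>
        let mask := c.foldl (fun z i => z + (1 : Int) <<< (i - 1).toNat) 0
        if pvIsFace cpx mask then st
        else if d == 2 || c.all (fun i => pvIsFace cpx (mask - (1 : Int) <<< (i - 1).toNat)) then
          (st.1 ++ [mask], st.2.modify (d - 2).toNat (· + 1))
        else st)
        ((((Pprev ++ Pre).filter (pvKeep cpx)).map fun c' => ((pvNmask c' : Nat) : Int)), vec) c))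
      ∧ (Q'.foldl (fun (st : List Int × List Int) (c : List Int) =>
        let nf := PySem.List.pyGetD (pvCpxBin [c]) 0 0
        if st.1.any (fun mnf => PySem.Int.bor mnf nf == nf) then st
        else if cpx.any (fun f => PySem.Int.bor nf f == f) then st
        else (st.1 ++ [nf], st.2.modify (d - 2).toNat (· + 1))) stA).1
      = (((Pprev ++ (Pre ++ c :: Q')).filter (pvKeep cpx)).map fun c' => ((pvNmask c' : Nat) : Int)) by
      rw [← hgen] at h
      exact h
    rw [← hstepEq]
    constructor
    · rw [hpair]
      exact ih1
    · rw [hpair, ih2]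
      simp

theorem pvOuter (cpx : List Int) (m n : Int) : ∀ (k : Nat),
    ((PySem.List.pyRange 2 (2 + (k : Int)) 1).foldl (fun st d =>
        (pvCombos (PySem.List.pyRange 1 (m + 1) 1) d.toNat).foldl
          (fun (st : List Int × List Int) (c : List Int) =>
            let nf := PySem.List.pyGetD (pvCpxBin [c]) 0 0
            if st.1.any (fun mnf => PySem.Int.bor mnf nf == nf) then st
            else if cpx.any (fun f => PySem.Int.bor nf f == f) then st
            else (st.1 ++ [nf], st.2.modify (d - 2).toNat (· + 1)))
          st)
        ([], List.replicate n.toNat 0)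
      = (PySem.List.pyRange 2 (2 + (k : Int)) 1).foldl (fun st d =>
        (pvCombos (PySem.List.pyRange 1 (m + 1) 1) d.toNat).foldl
          (fun (st : List Int × List Int) (c : List Int) =>
            let mask := c.foldl (fun z i => z + (1 : Int) <<< (i - 1).toNat) 0
            if pvIsFace cpx mask then st
            else if d == 2 || c.all (fun i => pvIsFace cpx (mask - (1 : Int) <<< (i - 1).toNat)) then
              (st.1 ++ [mask], st.2.modify (d - 2).toNat (· + 1))
            else st)
          st)
        ([], List.replicate n.toNat 0))
    ∧ (((PySem.List.pyRange 2 (2 + (k : Int)) 1).foldl (fun st d =>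
        (pvCombos (PySem.List.pyRange 1 (m + 1) 1) d.toNat).foldl
          (fun (st : List Int × List Int) (c : List Int) =>
            let nf := PySem.List.pyGetD (pvCpxBin [c]) 0 0
            if st.1.any (fun mnf => PySem.Int.bor mnf nf == nf) then st
            else if cpx.any (fun f => PySem.Int.bor nf f == f) then st
            else (st.1 ++ [nf], st.2.modify (d - 2).toNat (· + 1)))
          st)
        ([], List.replicate n.toNat 0)).1
      = ((((PySem.List.pyRange 2 (2 + (k : Int)) 1).flatMap
            (fun d => pvCombos (PySem.List.pyRange 1 (m + 1) 1) d.toNat)).filter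
          (pvKeep cpx)).map fun c' => ((pvNmask c' : Nat) : Int))) := by
  intro k
  induction k with
  | zero =>
    rw [show ((2 : Int) + ((0 : Nat) : Int)) = 2 by norm_num,
      PySem.List.pyRange_one_eq_nil le_rfl]
    simp
  | succ k ih =>
    obtain ⟨ihEq, ih1⟩ := ih
    have hcast : (2 : Int) + ((k + 1 : Nat) : Int) = (2 + (k : Int)) + 1 := by push_cast; ring
    have hsplit : PySem.List.pyRange 2 (2 + ((k + 1 : Nat) : Int)) 1
        = PySem.List.pyRange 2 (2 + (k : Int)) 1 ++ [2 + (k : Int)] := by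
      rw [hcast]
      exact PySem.List.pyRange_one_succ_right (by omega)
    rw [hsplit, List.foldl_append, List.foldl_append, List.foldl_cons, List.foldl_cons,
      List.foldl_nil, List.foldl_nil, ← ihEq]
    -- name the accumulated state
    set stK := ((PySem.List.pyRange 2 (2 + (k : Int)) 1).foldl (fun st d =>
        (pvCombos (PySem.List.pyRange 1 (m + 1) 1) d.toNat).foldl
          (fun (st : List Int × List Int) (c : List Int) =>
            let nf := PySem.List.pyGetD (pvCpxBin [c]) 0 0
            if st.1.any (fun mnf => PySem.Int.bor mnf nf == nf) then st
            else if cpx.any (fun f => PySem.Int.bor nf f == f) then st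
            else (st.1 ++ [nf], st.2.modify (d - 2).toNat (· + 1)))
          st)
        ([], List.replicate n.toNat 0)) with hgen
    have hpairK : stK = (((((PySem.List.pyRange 2 (2 + (k : Int)) 1).flatMap
          (fun d => pvCombos (PySem.List.pyRange 1 (m + 1) 1) d.toNat)).filter
        (pvKeep cpx)).map fun c' => ((pvNmask c' : Nat) : Int)), stK.2) := Prod.ext ih1 rfl
    have hD : (2 : Int) ≤ 2 + (k : Int) := by omega
    have hDtoNat : ((2 : Int) + (k : Int)).toNat = 2 + k := by omega
    have hPrevMem : ∀ c' ∈ (PySem.List.pyRange 2 (2 + (k : Int)) 1).flatMap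
        (fun d => pvCombos (PySem.List.pyRange 1 (m + 1) 1) d.toNat),
        c'.Sublist (PySem.List.pyRange 1 (m + 1) 1) ∧ 2 ≤ c'.length ∧
          c'.length < ((2 : Int) + (k : Int)).toNat := by
      intro c' hc'
      rw [List.mem_flatMap] at hc'
      obtain ⟨d', hd', hcc⟩ := hc'
      rw [PySem.List.mem_pyRange_one] at hd'
      refine ⟨pvCombos_sublist hcc, ?_, ?_⟩ <;> rw [pvCombos_length hcc] <;> omega
    have hPrevComp : ∀ u, u.Sublist (PySem.List.pyRange 1 (m + 1) 1) → 2 ≤ u.length →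
        u.length < ((2 : Int) + (k : Int)).toNat →
        u ∈ (PySem.List.pyRange 2 (2 + (k : Int)) 1).flatMap
          (fun d => pvCombos (PySem.List.pyRange 1 (m + 1) 1) d.toNat) := by
      intro u h1 h2 h3
      rw [List.mem_flatMap]
      refine ⟨(u.length : Int), ?_, ?_⟩
      · rw [PySem.List.mem_pyRange_one]; omega
      · exact pvCombos_complete h1 (by omega)
    obtain ⟨iEq, i1⟩ := pvInner cpx m (2 + (k : Int)) hD _ hPrevMem hPrevComp
      (pvCombos (PySem.List.pyRange 1 (m + 1) 1) ((2 : Int) + (k : Int)).toNat) []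
      (by simp) stK.2
    rw [List.append_nil] at iEq i1
    rw [hpairK]
    constructor
    · exact iEq
    · rw [i1]
      simp

theorem pvFinal (cpx : List Int) (m n : Int) :
    Minimal_non_faces cpx m n = Minimal_non_faces_alt cpx m n := by
  unfold Minimal_non_faces Minimal_non_faces_alt
  rcases le_or_gt 0 n with hn | hn
  · rw [show (n + 2 : Int) = 2 + ((n.toNat : Nat) : Int) by omega]
    exact (pvOuter cpx m n n.toNat).1
  · rw [PySem.List.pyRange_one_eq_nil (by omega : (n + 2 : Int) ≤ 2)]
    rfl

-- ===== VERDICT (by name: the statement is the Claim_ definition above) =====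
theorem Minimal_non_faces_spec : Claim_equal_Minimal_non_faces := by
  intro cpx m n _
  unfold Spec_Minimal_non_faces
  exact pvFinal cpx m n
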